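-- pv_equiv track=rewrite | github.com/phildsnutz/Xiphos-Vetting | backend/export_ai_challenge.py | _ambiguity_score
-- ===== SOURCE A (Python) =====
-- def _ambiguity_score(flags: list[str]) -> int:
--     score = 0
--     for flag in flags:
--         if flag in {"transshipment_or_intermediary", "telemetry_or_guidance", "surveillance_or_interception"}:
--             score += 2
--         else:
--             score += 1
--     return score
-- ===== SOURCE B (Python) =====
-- _SPECIAL = {"transshipment_or_intermediary", "telemetry_or_guidance", "surveillance_or_interception"}
--
-- def _ambiguity_score(flags: list[str]) -> int:
--     # Stage 1: tally each distinct flag once.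
--     counts = {}
--     for f in flags:
--         counts[f] = counts.get(f, 0) + 1
--     # Stage 2: weight each distinct flag by its multiplicity.
--     total = 0
--     for f, c in counts.items():
--         total += c * (2 if f in _SPECIAL else 1)
--     return total
-- ===== Notes on version B (the rewrite author's own statement) =====
-- stated objective: alternative
-- what changed: Replaces A's single per-element add-2/add-1 accumulator loop with a two-stage frequency-table algorithm: build a dict of multiplicities, then sum multiplicity-times-weight over the distinct flags; correct because the weighted sum over elements equals the sum over distinct keys of count*weight.
import Mathlib
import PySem

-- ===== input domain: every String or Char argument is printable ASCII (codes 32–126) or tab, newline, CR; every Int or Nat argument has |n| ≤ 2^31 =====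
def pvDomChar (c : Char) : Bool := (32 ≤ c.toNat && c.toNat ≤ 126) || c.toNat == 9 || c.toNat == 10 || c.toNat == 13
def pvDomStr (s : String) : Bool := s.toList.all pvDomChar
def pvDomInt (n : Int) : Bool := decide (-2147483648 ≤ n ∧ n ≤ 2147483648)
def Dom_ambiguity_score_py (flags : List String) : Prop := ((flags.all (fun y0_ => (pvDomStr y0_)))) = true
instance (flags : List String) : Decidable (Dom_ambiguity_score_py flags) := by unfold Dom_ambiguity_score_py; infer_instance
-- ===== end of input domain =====

-- B replaces A's single weighted accumulator loop with a two-stage frequency-table algorithm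
-- (tally multiplicities into a dict, then sum multiplicity * weight over distinct flags); objective: alternative.

-- ===== PORT A =====
-- literal port: one pass, adding 2 for a special flag, else 1
def ambiguity_score_py (flags : List String) : Int :=
  flags.foldl (fun score flag =>
    if flag ∈ (["transshipment_or_intermediary", "telemetry_or_guidance", "surveillance_or_interception"] : List String)
    then score + 2 else score + 1) 0

-- ===== PORT B =====
def pvSpecial : List String := ["transshipment_or_intermediary", "telemetry_or_guidance", "surveillance_or_interception"]

def ambiguity_score_py_alt (flags : List String) : Int :=
  -- stage 1: counts[f] = counts.get(f, 0) + 1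
  let counts : PySem.Dict String Int :=
    flags.foldl (fun d f => d.insert f (d.getD f 0 + 1)) PySem.Dict.empty
  -- stage 2: total += c * (2 if f in _SPECIAL else 1) over counts.items()
  counts.items.foldl (fun total p => total + p.2 * (if p.1 ∈ pvSpecial then 2 else 1)) 0

-- ===== PRECONDITION & SPEC =====
def Spec_ambiguity_score_py (flags : List String) (out : Int) : Prop := out = ambiguity_score_py_alt flags
instance (flags : List String) (out : Int) : Decidable (Spec_ambiguity_score_py flags out) := by unfold Spec_ambiguity_score_py; infer_instance

-- ===== CLAIM (what is proved, stated in full; the proofs are below) =====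
def Claim_equal_ambiguity_score_py : Prop := ∀ (flags : List String), Dom_ambiguity_score_py flags → Spec_ambiguity_score_py flags (ambiguity_score_py flags)

-- ===== LEMMAS AND PROOFS =====

-- the per-flag weight both programs use
def pvWeight (f : String) : Int := if f ∈ pvSpecial then 2 else 1

-- summing count(k) * w(k) over the distinct elements equals summing w over the list
theorem sum_count_mul_ofList (xs : List String) (w : String → Int) :
    ((PySem.Set.ofList xs).map (fun k => (xs.count k : Int) * w k)).sum = (xs.map w).sum := by
  have hnd : (PySem.Set.ofList xs).Nodup := PySem.Set.nodup_ofList xs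
  have htf : (PySem.Set.ofList xs).toFinset = xs.toFinset := by
    ext x; simp [PySem.Set.mem_ofList]
  rw [Finset.sum_list_map_count xs w, ← htf, ← List.sum_toFinset _ hnd]
  simp [mul_comm]

-- A is the weighted sum over the list
theorem ambiguity_score_py_eq_sum (flags : List String) :
    ambiguity_score_py flags = (flags.map pvWeight).sum := by
  unfold ambiguity_score_py
  have h : ∀ (s : Int) (f : String),
      (if f ∈ (["transshipment_or_intermediary", "telemetry_or_guidance", "surveillance_or_interception"] : List String)
       then s + 2 else s + 1) = s + pvWeight f := by
    intro s f; unfold pvWeight pvSpecial; split_ifs <;> rfl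
  simp only [h]
  rw [PySem.List.foldl_add flags pvWeight 0]; ring

-- B is the weighted sum over distinct flags with multiplicities
theorem ambiguity_score_py_alt_eq_sum (flags : List String) :
    ambiguity_score_py_alt flags = ((PySem.Set.ofList flags).map (fun k => (flags.count k : Int) * pvWeight k)).sum := by
  unfold ambiguity_score_py_alt
  simp only [PySem.Dict.foldl_insert_getD_add_one_eq_counter, PySem.Dict.items_counter]
  rw [PySem.List.foldl_add ((PySem.Set.ofList flags).map (fun k => (k, (flags.count k : Int))))
        (fun p => p.2 * (if p.1 ∈ pvSpecial then 2 else 1)) 0, List.map_map]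
  simp [pvWeight, Function.comp_def]

-- ===== VERDICT (by name: the statement is the Claim_ definition above) =====
theorem ambiguity_score_py_spec : Claim_equal_ambiguity_score_py := by
  intro flags _
  unfold Spec_ambiguity_score_py
  rw [ambiguity_score_py_eq_sum, ambiguity_score_py_alt_eq_sum, sum_count_mul_ofList]
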